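-- pv_equiv track=rewrite | github.com/TPCLF/DaAgent | agent/utils.py | parse_llm_action
-- ===== SOURCE A (Python) =====
-- from typing import List, Dict, Any, Optional, Tuple
--
-- def parse_llm_action(response_text: str) -> Tuple[Optional[str], Optional[str], Optional[str]]:
--     """
--     Parses the LLM output to identify tool calls.
--     Returns (tool_name, argument_1, argument_2)
--
--     Expected format in the response:
--     TOOL: <name>
--     ARG1: <arg1>
--     ARG2: <arg2> (optional)
--     """
--     lines = response_text.strip().splitlines()
--     tool = None
--     arg1 = None
--     arg2 = ""
--
--     # Very simple parsing logic for robustness with small models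
--     # We look for the last occurrence of TOOL: to act upon
--     # This allows the model to "think" before acting.
--
--     for i, line in enumerate(lines):
--         if line.startswith("TOOL:"):
--             tool = line.split(":", 1)[1].strip()
--             # Look ahead for args
--             # Look ahead for args
--             if i + 1 < len(lines) and lines[i+1].startswith("ARG1:"):
--                 arg1 = lines[i+1].split(":", 1)[1].strip()
--                 # Check for continuation of ARG1 (multiline)
--                 j = i + 2
--                 while j < len(lines) and not lines[j].startswith("ARG2:") and not lines[j].startswith("TOOL:"):
--                      # Special case for edit_file: if we see the start of a diff block, it's ARG2
--                      if tool == "edit_file" and lines[j].startswith("<<<<<<< SEARCH"):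
--                          break
--
--                      # It's part of ARG1 if it's not a keyword
--                      arg1 += "\n" + lines[j]
--                      j += 1
--
--                 # Check for ARG2
--                 if j < len(lines):
--                     if lines[j].startswith("ARG2:"):
--                         arg2 = lines[j].split(":", 1)[1].strip()
--                         # continuation for ARG2
--                         k = j + 1
--                         while k < len(lines) and not lines[k].startswith("TOOL:"):
--                             arg2 += "\n" + lines[k]
--                             k += 1
--                     elif tool == "edit_file" and lines[j].startswith("<<<<<<< SEARCH"):
--                         # Implicit ARG2 start for edit_file
--                         arg2 = lines[j]
--                         k = j + 1
--                         while k < len(lines) and not lines[k].startswith("TOOL:"):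
--                             arg2 += "\n" + lines[k]
--                             k += 1
--
--     return tool, arg1, arg2
-- ===== SOURCE B (Python) =====
-- def parse_llm_action(response_text):
--     """Single forward pass with a mode state machine (none/expect_arg1/in_arg1/in_arg2)."""
--     lines = response_text.strip().splitlines()
--     tool = None
--     arg1 = None
--     arg2 = ""
--     mode = "none"
--     for line in lines:
--         if line.startswith("TOOL:"):
--             tool = line.split(":", 1)[1].strip()
--             mode = "expect_arg1"
--         elif mode == "expect_arg1":
--             if line.startswith("ARG1:"):
--                 arg1 = line.split(":", 1)[1].strip()
--                 mode = "in_arg1"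
--             else:
--                 mode = "none"
--         elif mode == "in_arg1":
--             if line.startswith("ARG2:"):
--                 arg2 = line.split(":", 1)[1].strip()
--                 mode = "in_arg2"
--             elif tool == "edit_file" and line.startswith("<<<<<<< SEARCH"):
--                 arg2 = line
--                 mode = "in_arg2"
--             else:
--                 arg1 += "\n" + line
--         elif mode == "in_arg2":
--             arg2 += "\n" + line
--     return tool, arg1, arg2
-- ===== Notes on version B (the rewrite author's own statement) =====
-- stated objective: simpler
-- what changed: A restarts at every TOOL: line and re-scans ahead with nested while loops over later indices; B is a single forward pass over the lines with a mode state machine (NONE/EXPECT_ARG1/IN_ARG1/IN_ARG2) that never looks ahead or revisits a line.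
import Mathlib
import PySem

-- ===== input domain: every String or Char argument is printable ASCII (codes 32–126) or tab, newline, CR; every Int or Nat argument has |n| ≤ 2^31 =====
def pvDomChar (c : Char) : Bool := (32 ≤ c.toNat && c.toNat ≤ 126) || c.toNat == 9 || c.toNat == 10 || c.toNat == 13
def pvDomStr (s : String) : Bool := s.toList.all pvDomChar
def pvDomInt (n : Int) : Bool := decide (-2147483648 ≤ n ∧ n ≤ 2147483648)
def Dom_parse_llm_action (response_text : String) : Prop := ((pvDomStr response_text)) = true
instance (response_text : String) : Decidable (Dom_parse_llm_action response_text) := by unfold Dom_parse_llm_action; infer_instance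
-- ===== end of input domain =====

-- B replaces A's restart-and-lookahead outer loop (re-scanning ahead from every "TOOL:" line with
-- nested while loops) by one forward pass with a mode state machine; objective: simpler/alternative.

-- ===== PORT A =====

-- `line.split(":", 1)[1].strip()` — safe here because every caller has checked a prefix containing ':'
def pvAfterColon (l : String) : String :=
  match PySem.Str.splitMax? l ":" 1 with
  | some (_ :: r :: _) => PySem.Str.strip r
  | _ => ""   -- unreachable at call sites: the line starts with "TOOL:"/"ARG1:"/"ARG2:"

-- A's inner `while k < len(lines) and not lines[k].startswith("TOOL:")` (ARG2 continuation)
def pvScan2 : List String → String → String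
  | [], a2 => a2
  | l :: r, a2 =>
    if PySem.Str.startswith l "TOOL:" then a2
    else pvScan2 r (a2 ++ "\n" ++ l)

-- A's ARG1-continuation while loop together with the post-loop ARG2 / "<<<<<<< SEARCH" check
def pvScan12 : List String → String → String → String → String × String
  | [], _, a1, a2 => (a1, a2)
  | l :: r, t, a1, a2 =>
    if PySem.Str.startswith l "ARG2:" then (a1, pvScan2 r (pvAfterColon l))
    else if PySem.Str.startswith l "TOOL:" then (a1, a2)
    else if t == "edit_file" && PySem.Str.startswith l "<<<<<<< SEARCH" then (a1, pvScan2 r l)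
    else pvScan12 r t (a1 ++ "\n" ++ l) a2

-- the body executed for a "TOOL:" line: set tool, look ahead for ARG1/ARG2 in the following lines
def pvAblock (t : String) (r : List String) (a1? : Option String) (a2 : String) :
    Option String × Option String × String :=
  match r with
  | [] => (some t, a1?, a2)
  | l1 :: r1 =>
    if PySem.Str.startswith l1 "ARG1:" then
      let p := pvScan12 r1 t (pvAfterColon l1) a2
      (some t, some p.1, p.2)
    else (some t, a1?, a2)

-- A's outer `for i, line in enumerate(lines)` (each body only reads lines[i:], so it recurses on the suffix)
def pvAloop : List String → Option String × Option String × String → Option String × Option String × String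
  | [], s => s
  | l :: r, s =>
    pvAloop r (if PySem.Str.startswith l "TOOL:" then pvAblock (pvAfterColon l) r s.2.1 s.2.2 else s)

def parse_llm_action (response_text : String) : Option String × Option String × Option String :=
  let lines := PySem.Str.splitlines (PySem.Str.strip response_text)
  let s := pvAloop lines (none, none, "")
  (s.1, s.2.1, some s.2.2)

-- ===== PORT B =====

-- B's for-loop with the `mode` variable: one mutually recursive function per mode,
-- each consuming the rest of the lines (mode "none" carries the full (tool, arg1, arg2) state;
-- the other modes carry tool (and arg1) as plain strings, as B's Python guarantees them set there).
mutual
def pvBnone : List String → Option String × Option String × String → Option String × Option String × String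
  | [], s => s
  | l :: r, s =>
    if PySem.Str.startswith l "TOOL:" then pvBexp (pvAfterColon l) s.2.1 s.2.2 r
    else pvBnone r s

def pvBexp : String → Option String → String → List String → Option String × Option String × String
  | t, a1?, a2, [] => (some t, a1?, a2)
  | t, a1?, a2, l :: r =>
    if PySem.Str.startswith l "TOOL:" then pvBexp (pvAfterColon l) a1? a2 r
    else if PySem.Str.startswith l "ARG1:" then pvBarg1 t (pvAfterColon l) a2 r
    else pvBnone r (some t, a1?, a2)

def pvBarg1 : String → String → String → List String → Option String × Option String × String
  | t, a1, a2, [] => (some t, some a1, a2)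
  | t, a1, a2, l :: r =>
    if PySem.Str.startswith l "TOOL:" then pvBexp (pvAfterColon l) (some a1) a2 r
    else if PySem.Str.startswith l "ARG2:" then pvBarg2 t a1 (pvAfterColon l) r
    else if t == "edit_file" && PySem.Str.startswith l "<<<<<<< SEARCH" then pvBarg2 t a1 l r
    else pvBarg1 t (a1 ++ "\n" ++ l) a2 r

def pvBarg2 : String → String → String → List String → Option String × Option String × String
  | t, a1, a2, [] => (some t, some a1, a2)
  | t, a1, a2, l :: r =>
    if PySem.Str.startswith l "TOOL:" then pvBexp (pvAfterColon l) (some a1) a2 r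
    else pvBarg2 t a1 (a2 ++ "\n" ++ l) r
end

def parse_llm_action_alt (response_text : String) : Option String × Option String × Option String :=
  let lines := PySem.Str.splitlines (PySem.Str.strip response_text)
  let s := pvBnone lines (none, none, "")
  (s.1, s.2.1, some s.2.2)

-- ===== PRECONDITION & SPEC =====
def Spec_parse_llm_action (response_text : String) (out : Option String × Option String × Option String) : Prop := out = parse_llm_action_alt response_text
instance (response_text : String) (out : Option String × Option String × Option String) : Decidable (Spec_parse_llm_action response_text out) := by unfold Spec_parse_llm_action; infer_instance

-- ===== CLAIM (what is proved, stated in full; the proofs are below) =====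
def Claim_equal_parse_llm_action : Prop := ∀ (response_text : String), Dom_parse_llm_action response_text → Spec_parse_llm_action response_text (parse_llm_action response_text)

-- ===== LEMMAS AND PROOFS =====

-- two marker prefixes with different first characters cannot both be prefixes of one line
theorem pv_sw_disj (l p q : String) (c d : Char) (tp tq : List Char)
    (hpl : p.toList = c :: tp) (hql : q.toList = d :: tq) (hcd : c ≠ d)
    (h : PySem.Str.startswith l p = true) : PySem.Str.startswith l q = false := by
  simp only [PySem.Str.startswith_eq] at h ⊢
  rw [PySem.Chars.startswith_iff] at h
  by_contra hq
  rw [Bool.not_eq_false, PySem.Chars.startswith_iff] at hq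
  rcases h with ⟨t1, e1⟩
  rcases hq with ⟨t2, e2⟩
  rw [hpl] at e1; rw [hql] at e2
  rw [← e1] at e2
  simp only [List.cons_append, List.cons.injEq] at e2
  exact hcd (e2.1.symm)

theorem pv_arg1_not_tool (l : String) (h : PySem.Str.startswith l "ARG1:" = true) :
    PySem.Str.startswith l "TOOL:" = false :=
  pv_sw_disj l "ARG1:" "TOOL:" 'A' 'T' _ _ rfl rfl (by decide) h

theorem pv_arg2_not_tool (l : String) (h : PySem.Str.startswith l "ARG2:" = true) :
    PySem.Str.startswith l "TOOL:" = false :=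
  pv_sw_disj l "ARG2:" "TOOL:" 'A' 'T' _ _ rfl rfl (by decide) h

-- mode IN_ARG2 computes A's ARG2-continuation scan and then behaves like mode NONE
theorem pv_L2 : ∀ (ls : List String) (t a1 a2 : String),
    pvBarg2 t a1 a2 ls = pvBnone ls (some t, some a1, pvScan2 ls a2) := by
  intro ls
  induction ls with
  | nil => intro t a1 a2; rfl
  | cons l r ih =>
    intro t a1 a2
    by_cases hT : PySem.Str.startswith l "TOOL:" = true
    · simp only [pvBarg2, pvBnone, pvScan2, hT, if_true]
    · simp only [Bool.not_eq_true] at hT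
      simp only [pvBarg2, pvBnone, pvScan2, hT, Bool.false_eq_true, if_false, ih]

-- mode IN_ARG1 computes A's ARG1 scan (with its ARG2 tail) and then behaves like mode NONE
theorem pv_L1 : ∀ (ls : List String) (t a1 a2 : String),
    pvBarg1 t a1 a2 ls =
      pvBnone ls (some t, some (pvScan12 ls t a1 a2).1, (pvScan12 ls t a1 a2).2) := by
  intro ls
  induction ls with
  | nil => intro t a1 a2; rfl
  | cons l r ih =>
    intro t a1 a2
    by_cases h2 : PySem.Str.startswith l "ARG2:" = true
    · have hT := pv_arg2_not_tool l h2
      simp only [pvBarg1, pvBnone, pvScan12, h2, hT, Bool.false_eq_true, if_false, if_true, pv_L2]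
    · simp only [Bool.not_eq_true] at h2
      by_cases hT : PySem.Str.startswith l "TOOL:" = true
      · simp only [pvBarg1, pvBnone, pvScan12, h2, hT, Bool.false_eq_true, if_false, if_true]
      · simp only [Bool.not_eq_true] at hT
        by_cases hS : (t == "edit_file" && PySem.Str.startswith l "<<<<<<< SEARCH") = true
        · simp only [pvBarg1, pvBnone, pvScan12, h2, hT, hS, Bool.false_eq_true, if_false,
            if_true, pv_L2]
        · simp only [Bool.not_eq_true] at hS
          simp only [pvBarg1, pvBnone, pvScan12, h2, hT, hS, Bool.false_eq_true, if_false, ih]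

-- after a TOOL line, A's look-ahead block followed by its outer-loop replay equals mode EXPECT_ARG1
theorem pv_E (n : Nat)
    (HM : ∀ ls' : List String, ls'.length < n → ∀ s, pvAloop ls' s = pvBnone ls' s) :
    ∀ ls : List String, ls.length < n → ∀ (t : String) (a1? : Option String) (a2 : String),
      pvAloop ls (pvAblock t ls a1? a2) = pvBexp t a1? a2 ls := by
  intro ls
  induction ls with
  | nil => intro _ t a1? a2; rfl
  | cons l1 r1 ih =>
    intro hlen t a1? a2
    have hr1 : r1.length < n := by simp only [List.length_cons] at hlen; omega
    by_cases h1 : PySem.Str.startswith l1 "ARG1:" = true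
    · have hT := pv_arg1_not_tool l1 h1
      simp only [pvAblock, pvAloop, pvBexp, h1, hT, Bool.false_eq_true, if_false, if_true,
        HM r1 hr1, pv_L1]
    · simp only [Bool.not_eq_true] at h1
      by_cases hT : PySem.Str.startswith l1 "TOOL:" = true
      · simp only [pvAblock, pvAloop, pvBexp, h1, hT, Bool.false_eq_true, if_false, if_true]
        exact ih hr1 (pvAfterColon l1) a1? a2
      · simp only [Bool.not_eq_true] at hT
        simp only [pvAblock, pvAloop, pvBexp, h1, hT, Bool.false_eq_true, if_false, HM r1 hr1]

-- main loop invariant: A's outer loop equals B's machine started in mode NONE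
theorem pv_main : ∀ (ls : List String) (s : Option String × Option String × String),
    pvAloop ls s = pvBnone ls s := by
  have H : ∀ n (ls : List String), ls.length < n → ∀ s, pvAloop ls s = pvBnone ls s := by
    intro n
    induction n with
    | zero => intro ls h; omega
    | succ n ih =>
      intro ls hlen s
      cases ls with
      | nil => rfl
      | cons l r =>
        have hr : r.length < n := by simp only [List.length_cons] at hlen; omega
        by_cases hT : PySem.Str.startswith l "TOOL:" = true
        · simp only [pvAloop, pvBnone, hT, if_true]
          exact pv_E n ih r hr (pvAfterColon l) s.2.1 s.2.2
        · simp only [Bool.not_eq_true] at hT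
          simp only [pvAloop, pvBnone, hT, Bool.false_eq_true, if_false, ih r hr]
  exact fun ls s => H (ls.length + 1) ls (by omega) s

-- ===== VERDICT (by name: the statement is the Claim_ definition above) =====
theorem parse_llm_action_spec : Claim_equal_parse_llm_action := by
  intro rt _
  unfold Spec_parse_llm_action
  simp only [parse_llm_action, parse_llm_action_alt, pv_main]
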